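-- pv_equiv track=rewrite | github.com/FaisalTabrez/Avalanche_eDNA | src/analysis/enhanced_diversity_analyzer.py | _classify_abundance_classes
-- ===== SOURCE A (Python) =====
-- from typing import Dict, List, Any, Optional, Tuple
--
-- def _classify_abundance_classes(abundances: List[int]) -> Dict[str, int]:
--     """Classify species into abundance classes."""
--     classes = {
--         'very_abundant': sum(1 for count in abundances if count > 100),
--         'abundant': sum(1 for count in abundances if 50 < count <= 100),
--         'common': sum(1 for count in abundances if 10 < count <= 50),
--         'uncommon': sum(1 for count in abundances if 5 < count <= 10),
--         'rare': sum(1 for count in abundances if 2 < count <= 5),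
--         'very_rare': sum(1 for count in abundances if count <= 2)
--     }
--
--     return classes
-- ===== SOURCE B (Python) =====
-- from typing import Dict, List
--
-- def _classify_abundance_classes(abundances: List[int]) -> Dict[str, int]:
--     classes = {'very_abundant': 0, 'abundant': 0, 'common': 0,
--                'uncommon': 0, 'rare': 0, 'very_rare': 0}
--     for count in abundances:
--         if count > 100:
--             classes['very_abundant'] += 1
--         elif count > 50:
--             classes['abundant'] += 1
--         elif count > 10:
--             classes['common'] += 1
--         elif count > 5:
--             classes['uncommon'] += 1
--         elif count > 2:
--             classes['rare'] += 1
--         else: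
--             classes['very_rare'] += 1
--     return classes
-- ===== Notes on version B (the rewrite author's own statement) =====
-- stated objective: faster
-- what changed: Replaces six separate generator-expression scans of the list (one per bucket) with a single pass that classifies each count once via an if/elif chain into a pre-initialized dict.
import Mathlib
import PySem

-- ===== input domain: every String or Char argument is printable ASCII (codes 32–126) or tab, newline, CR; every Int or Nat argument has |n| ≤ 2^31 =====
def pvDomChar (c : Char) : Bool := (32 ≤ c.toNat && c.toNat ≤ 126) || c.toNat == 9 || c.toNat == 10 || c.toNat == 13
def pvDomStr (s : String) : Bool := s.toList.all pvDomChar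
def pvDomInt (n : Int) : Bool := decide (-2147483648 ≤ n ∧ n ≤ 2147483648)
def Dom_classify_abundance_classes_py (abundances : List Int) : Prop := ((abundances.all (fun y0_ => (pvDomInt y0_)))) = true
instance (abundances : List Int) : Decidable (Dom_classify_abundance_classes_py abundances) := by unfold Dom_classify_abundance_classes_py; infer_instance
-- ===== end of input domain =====

-- B replaces A's six separate list scans (one 0/1-sum per bucket) with one classifying pass; objective: faster (constant factor).

-- ===== PORT A =====
-- each dict value is sum(1 for count in abundances if <cond>): a sum of ones over the filtered list
def classify_abundance_classes_py (abundances : List Int) : List (String × Int) :=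
  [("very_abundant", ((abundances.filter (fun count => decide (100 < count))).map (fun _ => (1 : Int))).sum),
   ("abundant",      ((abundances.filter (fun count => decide (50 < count ∧ count ≤ 100))).map (fun _ => (1 : Int))).sum),
   ("common",        ((abundances.filter (fun count => decide (10 < count ∧ count ≤ 50))).map (fun _ => (1 : Int))).sum),
   ("uncommon",      ((abundances.filter (fun count => decide (5 < count ∧ count ≤ 10))).map (fun _ => (1 : Int))).sum),
   ("rare",          ((abundances.filter (fun count => decide (2 < count ∧ count ≤ 5))).map (fun _ => (1 : Int))).sum),
   ("very_rare",     ((abundances.filter (fun count => decide (count ≤ 2))).map (fun _ => (1 : Int))).sum)]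

-- ===== PORT B =====
-- one pass: an if/elif chain increments exactly one of six counters (va, ab, co, un, ra, vr)
def classify_abundance_classes_py_alt (abundances : List Int) : List (String × Int) :=
  let r := abundances.foldl (fun (s : Int × Int × Int × Int × Int × Int) count =>
      if 100 < count then (s.1 + 1, s.2.1, s.2.2.1, s.2.2.2.1, s.2.2.2.2.1, s.2.2.2.2.2)
      else if 50 < count then (s.1, s.2.1 + 1, s.2.2.1, s.2.2.2.1, s.2.2.2.2.1, s.2.2.2.2.2)
      else if 10 < count then (s.1, s.2.1, s.2.2.1 + 1, s.2.2.2.1, s.2.2.2.2.1, s.2.2.2.2.2)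
      else if 5 < count then (s.1, s.2.1, s.2.2.1, s.2.2.2.1 + 1, s.2.2.2.2.1, s.2.2.2.2.2)
      else if 2 < count then (s.1, s.2.1, s.2.2.1, s.2.2.2.1, s.2.2.2.2.1 + 1, s.2.2.2.2.2)
      else (s.1, s.2.1, s.2.2.1, s.2.2.2.1, s.2.2.2.2.1, s.2.2.2.2.2 + 1))
    (0, 0, 0, 0, 0, 0)
  [("very_abundant", r.1), ("abundant", r.2.1), ("common", r.2.2.1),
   ("uncommon", r.2.2.2.1), ("rare", r.2.2.2.2.1), ("very_rare", r.2.2.2.2.2)]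

-- ===== PRECONDITION & SPEC =====
def Spec_classify_abundance_classes_py (abundances : List Int) (out : List (String × Int)) : Prop := out = classify_abundance_classes_py_alt abundances
instance (abundances : List Int) (out : List (String × Int)) : Decidable (Spec_classify_abundance_classes_py abundances out) := by unfold Spec_classify_abundance_classes_py; infer_instance

-- ===== CLAIM (what is proved, stated in full; the proofs are below) =====
def Claim_equal_classify_abundance_classes_py : Prop := ∀ (abundances : List Int), Dom_classify_abundance_classes_py abundances → Spec_classify_abundance_classes_py abundances (classify_abundance_classes_py abundances)

-- ===== LEMMAS AND PROOFS =====

-- B's fold from an arbitrary start tuple adds exactly A's six bucket counts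
lemma alt_foldl_spec (xs : List Int) (s : Int × Int × Int × Int × Int × Int) :
    xs.foldl (fun (s : Int × Int × Int × Int × Int × Int) count =>
      if 100 < count then (s.1 + 1, s.2.1, s.2.2.1, s.2.2.2.1, s.2.2.2.2.1, s.2.2.2.2.2)
      else if 50 < count then (s.1, s.2.1 + 1, s.2.2.1, s.2.2.2.1, s.2.2.2.2.1, s.2.2.2.2.2)
      else if 10 < count then (s.1, s.2.1, s.2.2.1 + 1, s.2.2.2.1, s.2.2.2.2.1, s.2.2.2.2.2)
      else if 5 < count then (s.1, s.2.1, s.2.2.1, s.2.2.2.1 + 1, s.2.2.2.2.1, s.2.2.2.2.2)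
      else if 2 < count then (s.1, s.2.1, s.2.2.1, s.2.2.2.1, s.2.2.2.2.1 + 1, s.2.2.2.2.2)
      else (s.1, s.2.1, s.2.2.1, s.2.2.2.1, s.2.2.2.2.1, s.2.2.2.2.2 + 1)) s
    = (s.1 + ((xs.filter (fun count => decide (100 < count))).map (fun _ => (1 : Int))).sum,
       s.2.1 + ((xs.filter (fun count => decide (50 < count ∧ count ≤ 100))).map (fun _ => (1 : Int))).sum,
       s.2.2.1 + ((xs.filter (fun count => decide (10 < count ∧ count ≤ 50))).map (fun _ => (1 : Int))).sum,
       s.2.2.2.1 + ((xs.filter (fun count => decide (5 < count ∧ count ≤ 10))).map (fun _ => (1 : Int))).sum,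
       s.2.2.2.2.1 + ((xs.filter (fun count => decide (2 < count ∧ count ≤ 5))).map (fun _ => (1 : Int))).sum,
       s.2.2.2.2.2 + ((xs.filter (fun count => decide (count ≤ 2))).map (fun _ => (1 : Int))).sum) := by
  induction xs generalizing s with
  | nil => simp
  | cons x xs ih =>
    simp only [List.foldl_cons]
    rw [ih]
    simp only [List.filter_cons]
    by_cases h1 : 100 < x
    · simp only [decide_eq_true_eq, if_pos h1,
        if_neg (show ¬(50 < x ∧ x ≤ 100) by omega), if_neg (show ¬(10 < x ∧ x ≤ 50) by omega),
        if_neg (show ¬(5 < x ∧ x ≤ 10) by omega), if_neg (show ¬(2 < x ∧ x ≤ 5) by omega),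
        if_neg (show ¬(x ≤ 2) by omega), List.map_cons, List.sum_cons, Prod.mk.injEq, and_true, true_and]
      omega
    by_cases h2 : 50 < x
    · simp only [if_neg h1, if_pos h2, decide_eq_true_eq,
        if_pos (show 50 < x ∧ x ≤ 100 by omega),
        if_neg (show ¬(10 < x ∧ x ≤ 50) by omega),
        if_neg (show ¬(5 < x ∧ x ≤ 10) by omega), if_neg (show ¬(2 < x ∧ x ≤ 5) by omega),
        if_neg (show ¬(x ≤ 2) by omega), List.map_cons, List.sum_cons, Prod.mk.injEq, and_true, true_and]
      omega
    by_cases h3 : 10 < x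
    · simp only [if_neg h1, if_neg h2, if_pos h3, decide_eq_true_eq,
        if_neg (show ¬(50 < x ∧ x ≤ 100) by omega),
        if_pos (show 10 < x ∧ x ≤ 50 by omega),
        if_neg (show ¬(5 < x ∧ x ≤ 10) by omega), if_neg (show ¬(2 < x ∧ x ≤ 5) by omega),
        if_neg (show ¬(x ≤ 2) by omega), List.map_cons, List.sum_cons, Prod.mk.injEq, and_true, true_and]
      omega
    by_cases h4 : 5 < x
    · simp only [if_neg h1, if_neg h2, if_neg h3, if_pos h4, decide_eq_true_eq,
        if_neg (show ¬(50 < x ∧ x ≤ 100) by omega),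
        if_neg (show ¬(10 < x ∧ x ≤ 50) by omega),
        if_pos (show 5 < x ∧ x ≤ 10 by omega), if_neg (show ¬(2 < x ∧ x ≤ 5) by omega),
        if_neg (show ¬(x ≤ 2) by omega), List.map_cons, List.sum_cons, Prod.mk.injEq, and_true, true_and]
      omega
    by_cases h5 : 2 < x
    · simp only [if_neg h1, if_neg h2, if_neg h3, if_neg h4, if_pos h5, decide_eq_true_eq,
        if_neg (show ¬(50 < x ∧ x ≤ 100) by omega),
        if_neg (show ¬(10 < x ∧ x ≤ 50) by omega), if_neg (show ¬(5 < x ∧ x ≤ 10) by omega),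
        if_pos (show 2 < x ∧ x ≤ 5 by omega),
        if_neg (show ¬(x ≤ 2) by omega), List.map_cons, List.sum_cons, Prod.mk.injEq, and_true, true_and]
      omega
    · simp only [if_neg h1, if_neg h2, if_neg h3, if_neg h4, if_neg h5, decide_eq_true_eq,
        if_neg (show ¬(50 < x ∧ x ≤ 100) by omega),
        if_neg (show ¬(10 < x ∧ x ≤ 50) by omega), if_neg (show ¬(5 < x ∧ x ≤ 10) by omega),
        if_neg (show ¬(2 < x ∧ x ≤ 5) by omega),
        if_pos (show x ≤ 2 by omega), List.map_cons, List.sum_cons, Prod.mk.injEq, and_true, true_and]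
      omega

-- ===== VERDICT (by name: the statement is the Claim_ definition above) =====
theorem classify_abundance_classes_py_spec : Claim_equal_classify_abundance_classes_py := by
  intro abundances _
  unfold Spec_classify_abundance_classes_py classify_abundance_classes_py classify_abundance_classes_py_alt
  rw [alt_foldl_spec]
  simp
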